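-- pv_equiv track=rewrite | github.com/teresaibarra/texts | utils/generate_site_data.py | get_longest_messages
-- ===== SOURCE A (Python) =====
-- def get_longest_messages(messages, name_map, should_find_longest):
--     longest_messages_by_sender = {display_name: "" for display_name in name_map.values()}
--
--     if not should_find_longest:
--         return longest_messages_by_sender
--
--     for message in messages:
--         if "content" in message:
--             sender = message['sender_name']
--             display_name = name_map[sender]
--             content_length = len(message['content'])
--
--             if content_length > len(longest_messages_by_sender[display_name]):
--                 longest_messages_by_sender[display_name] = message["content"]
--
--     return longest_messages_by_sender
-- ===== SOURCE B (Python) =====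
-- def get_longest_messages(messages, name_map, should_find_longest):
--     display_names = list(dict.fromkeys(name_map.values()))
--     if not should_find_longest:
--         return {dn: "" for dn in display_names}
--
--     def best_for(dn):
--         best = ""
--         for message in messages:
--             if "content" in message and name_map[message["sender_name"]] == dn:
--                 if len(message["content"]) > len(best):
--                     best = message["content"]
--         return best
--
--     return {dn: best_for(dn) for dn in display_names}
-- ===== Notes on version B (the rewrite author's own statement) =====
-- stated objective: alternative
-- what changed: Replaces A's single pass that threads a running-longest dict through the messages by an independent per-display-name scan: B dedups name_map.values() once, then for each display name scans the messages for its first longest content, so the mutable dict accumulator disappears.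
import Mathlib
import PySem

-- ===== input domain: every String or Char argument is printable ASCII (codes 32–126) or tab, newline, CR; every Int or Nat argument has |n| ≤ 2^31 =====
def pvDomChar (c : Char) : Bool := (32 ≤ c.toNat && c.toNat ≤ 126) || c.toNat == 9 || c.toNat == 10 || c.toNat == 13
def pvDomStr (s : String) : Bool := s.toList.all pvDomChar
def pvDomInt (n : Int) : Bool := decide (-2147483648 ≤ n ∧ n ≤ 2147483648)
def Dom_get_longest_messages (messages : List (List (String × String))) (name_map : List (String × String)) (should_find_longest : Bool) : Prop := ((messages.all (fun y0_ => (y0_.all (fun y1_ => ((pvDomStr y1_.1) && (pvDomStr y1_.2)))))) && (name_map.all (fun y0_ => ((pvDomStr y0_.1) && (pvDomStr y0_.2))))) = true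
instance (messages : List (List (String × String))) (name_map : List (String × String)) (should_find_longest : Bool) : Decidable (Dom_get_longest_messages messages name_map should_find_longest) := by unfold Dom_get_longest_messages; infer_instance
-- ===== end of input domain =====

-- B replaces A's single running-max dict pass by an independent first-longest scan per
-- display name (alternative decomposition; not claimed faster). Equivalence of RETURN values.

-- ===== PORT A =====
-- one iteration of A's `for message in messages` loop body; the `none` branches of the
-- sender/name_map lookups are where Python raises KeyError (excluded by Pre_)
def pvAStep (name_map : List (String × String)) (d : PySem.Dict String String) (m : List (String × String)) : PySem.Dict String String :=
  match (PySem.Dict.mk m).get? "content" with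
  | none => d
  | some content =>
    match (PySem.Dict.mk m).get? "sender_name" with
    | none => d
    | some sender =>
      match (PySem.Dict.mk name_map).get? sender with
      | none => d
      | some display_name =>
        if PySem.Str.len (d.getD display_name "") < PySem.Str.len content then
          d.insert display_name content
        else d

def get_longest_messages (messages : List (List (String × String))) (name_map : List (String × String)) (should_find_longest : Bool) : List (String × String) :=
  let init : PySem.Dict String String :=
    name_map.foldl (fun d kv => d.insert kv.2 "") PySem.Dict.empty
  if !should_find_longest then init.items
  else (messages.foldl (pvAStep name_map) init).items

-- ===== PORT B =====
-- one iteration of B's inner `for message in messages` loop body (inside best_for)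
def pvBStep (name_map : List (String × String)) (dn : String) (best : String) (m : List (String × String)) : String :=
  match (PySem.Dict.mk m).get? "content" with
  | none => best
  | some content =>
    match (PySem.Dict.mk m).get? "sender_name" with
    | none => best
    | some sender =>
      match (PySem.Dict.mk name_map).get? sender with
      | none => best
      | some dn' =>
        if dn' = dn then
          (if PySem.Str.len best < PySem.Str.len content then content else best)
        else best

def pvBestFor (messages : List (List (String × String))) (name_map : List (String × String)) (dn : String) : String :=
  messages.foldl (pvBStep name_map dn) ""

def get_longest_messages_alt (messages : List (List (String × String))) (name_map : List (String × String)) (should_find_longest : Bool) : List (String × String) :=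
  let display_names := PySem.List.dedup (name_map.map Prod.snd)
  if !should_find_longest then display_names.map (fun dn => (dn, ""))
  else display_names.map (fun dn => (dn, pvBestFor messages name_map dn))

-- ===== PRECONDITION & SPEC =====
-- Pre_ excludes exactly the inputs where Python A raises KeyError: when finding longest,
-- every message carrying a "content" key must carry a "sender_name" key whose value is a
-- key of name_map.
def Pre_get_longest_messages (messages : List (List (String × String))) (name_map : List (String × String)) (should_find_longest : Bool) : Prop :=
  should_find_longest = true →
    ∀ m ∈ messages, ((PySem.Dict.mk m).get? "content").isSome = true →
      (((PySem.Dict.mk m).get? "sender_name").bind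
        (fun s => (PySem.Dict.mk name_map).get? s)).isSome = true
instance (messages : List (List (String × String))) (name_map : List (String × String)) (should_find_longest : Bool) : Decidable (Pre_get_longest_messages messages name_map should_find_longest) := by unfold Pre_get_longest_messages; infer_instance

def pvWitness_get_longest_messages : (List (List (String × String))) × (List (String × String)) × Bool :=
  ([[("content", "hiya"), ("sender_name", "a")], [("sender_name", "b")], [("content", "hi"), ("sender_name", "a")]],
   [("a", "Alice"), ("b", "Alice")], true)

def Spec_get_longest_messages (messages : List (List (String × String))) (name_map : List (String × String)) (should_find_longest : Bool) (out : List (String × String)) : Prop := out = get_longest_messages_alt messages name_map should_find_longest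
instance (messages : List (List (String × String))) (name_map : List (String × String)) (should_find_longest : Bool) (out : List (String × String)) : Decidable (Spec_get_longest_messages messages name_map should_find_longest out) := by unfold Spec_get_longest_messages; infer_instance

-- ===== CLAIM (what is proved, stated in full; the proofs are below) =====
def Claim_equal_get_longest_messages : Prop := ∀ (messages : List (List (String × String))) (name_map : List (String × String)) (should_find_longest : Bool), Dom_get_longest_messages messages name_map should_find_longest → Pre_get_longest_messages messages name_map should_find_longest → Spec_get_longest_messages messages name_map should_find_longest (get_longest_messages messages name_map should_find_longest)

-- ===== LEMMAS AND PROOFS =====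

lemma pvContains_mk_map (acc : List String) (f : String → String) (v : String) :
    (PySem.Dict.mk (acc.map (fun dn => (dn, f dn)))).contains v = acc.contains v := by
  induction acc with
  | nil => rfl
  | cons a acc ih =>
    by_cases h : a = v <;>
      simp_all [PySem.Dict.contains, Ne.symm]

lemma pvGetD_mk_map (acc : List String) (f : String → String) (v : String) (h : v ∈ acc) :
    (PySem.Dict.mk (acc.map (fun dn => (dn, f dn)))).getD v "" = f v := by
  induction acc with
  | nil => simp at h
  | cons a acc ih =>
    rcases List.mem_cons.mp h with h | h
    · subst h; simp [PySem.Dict.getD, PySem.Dict.get?]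
    · by_cases hav : a = v
      · subst hav; simp [PySem.Dict.getD, PySem.Dict.get?]
      · simpa [PySem.Dict.getD, PySem.Dict.get?, List.find?_cons, hav] using ih h

lemma pvInsert_mk_map (acc : List String) (f : String → String) (v c : String) (h : v ∈ acc) :
    (PySem.Dict.mk (acc.map (fun dn => (dn, f dn)))).insert v c
      = PySem.Dict.mk (acc.map (fun dn => (dn, if dn = v then c else f dn))) := by
  have hc : (PySem.Dict.mk (acc.map (fun dn => (dn, f dn)))).contains v = true := by
    rw [pvContains_mk_map]; exact List.elem_eq_true_of_mem h
  simp only [PySem.Dict.insert, hc, if_pos]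
  congr 1
  simp only [List.map_map]
  apply List.map_congr_left
  intro dn _
  by_cases hdv : dn = v <;> simp [hdv]

lemma pvGet?_mk_mem (nm : List (String × String)) (s v : String)
    (h : (PySem.Dict.mk nm).get? s = some v) : v ∈ nm.map Prod.snd := by
  simp only [PySem.Dict.get?, Option.map_eq_some_iff] at h
  obtain ⟨p, hp, hv⟩ := h
  exact hv ▸ List.mem_map_of_mem (List.mem_of_find?_eq_some hp)

lemma pvInit_gen (nm : List (String × String)) : ∀ acc : List String,
    nm.foldl (fun d kv => d.insert kv.2 "") (PySem.Dict.mk (acc.map (fun dn => (dn, ""))))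
      = PySem.Dict.mk ((PySem.Set.update acc (nm.map Prod.snd)).map (fun dn => (dn, ""))) := by
  induction nm with
  | nil => intro acc; simp [PySem.Set.update]
  | cons kv nm ih =>
    intro acc
    have hstep : (PySem.Dict.mk (acc.map (fun dn => (dn, "")))).insert kv.2 ""
        = PySem.Dict.mk ((PySem.Set.add acc kv.2).map (fun dn => (dn, ""))) := by
      by_cases h : kv.2 ∈ acc
      · rw [pvInsert_mk_map _ _ _ _ h]
        have : PySem.Set.add acc kv.2 = acc := by
          simp [PySem.Set.add, PySem.Set.contains, List.contains_eq_mem, h]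
        rw [this]
        congr 1
        apply List.map_congr_left
        intro dn _; by_cases hdv : dn = kv.2 <;> simp [hdv]
      · have hc : (PySem.Dict.mk (acc.map (fun dn => (dn, "")))).contains kv.2 = false := by
          rw [pvContains_mk_map]
          simpa using h
        have : PySem.Set.add acc kv.2 = acc ++ [kv.2] := by
          simp [PySem.Set.add, PySem.Set.contains]
          intro hmem; exact absurd hmem h
        rw [this]
        simp [PySem.Dict.insert, hc]
    simp only [List.foldl_cons, List.map_cons, hstep, ih]
    rfl

lemma pvLoop_eq (nm : List (String × String)) (messages : List (List (String × String)))
    (dns : List String)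
    (H : ∀ s v, (PySem.Dict.mk nm).get? s = some v → v ∈ dns) :
    ∀ f : String → String,
    (messages.foldl (pvAStep nm) (PySem.Dict.mk (dns.map (fun dn => (dn, f dn))))).items
      = dns.map (fun dn => (dn, messages.foldl (pvBStep nm dn) (f dn))) := by
  induction messages with
  | nil => intro f; rfl
  | cons m ms ih =>
    intro f
    have hstep : pvAStep nm (PySem.Dict.mk (dns.map (fun dn => (dn, f dn)))) m
        = PySem.Dict.mk (dns.map (fun dn => (dn, pvBStep nm dn (f dn) m))) := by
      unfold pvAStep
      cases hc : (PySem.Dict.mk m).get? "content" with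
      | none =>
        dsimp only
        congr 1; apply List.map_congr_left; intro dn _
        simp [pvBStep, hc]
      | some content =>
        cases hs : (PySem.Dict.mk m).get? "sender_name" with
        | none =>
          dsimp only
          congr 1; apply List.map_congr_left; intro dn _
          simp [pvBStep, hc, hs]
        | some sender =>
          cases hd : (PySem.Dict.mk nm).get? sender with
          | none =>
            dsimp only
            rw [hd]
            dsimp only
            congr 1; apply List.map_congr_left; intro dn _
            simp [pvBStep, hc, hs, hd]
          | some dn' =>
            have hmem : dn' ∈ dns := H _ _ hd
            dsimp only
            rw [hd]
            dsimp only
            rw [pvGetD_mk_map _ _ _ hmem]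
            by_cases hlt : PySem.Str.len (f dn') < PySem.Str.len content
            · rw [if_pos hlt, pvInsert_mk_map _ _ _ _ hmem]
              congr 1; apply List.map_congr_left; intro dn _
              simp only [pvBStep, hc, hs, hd]
              by_cases hdd : dn = dn'
              · subst hdd
                simp only [if_true]
                rw [if_pos hlt]
              · simp [hdd, Ne.symm hdd]
            · rw [if_neg hlt]
              congr 1; apply List.map_congr_left; intro dn _
              simp only [pvBStep, hc, hs, hd]
              by_cases hdd : dn' = dn
              · subst hdd
                simp only [if_true]
                rw [if_neg hlt]
              · simp [hdd]
    rw [List.foldl_cons, hstep, ih]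
    apply List.map_congr_left
    intro dn _
    rw [List.foldl_cons]

lemma pvInit_eq (nm : List (String × String)) :
    nm.foldl (fun d kv => d.insert kv.2 "") PySem.Dict.empty
      = PySem.Dict.mk ((PySem.List.dedup (nm.map Prod.snd)).map (fun dn => (dn, ""))) :=
  pvInit_gen nm []

-- ===== VERDICT (by name: the statement is the Claim_ definition above) =====
theorem get_longest_messages_spec : Claim_equal_get_longest_messages := by
  intro messages nm b _ _
  unfold Spec_get_longest_messages get_longest_messages get_longest_messages_alt
  cases b with
  | false =>
    simp only [Bool.not_false, if_pos]
    rw [pvInit_eq]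
  | true =>
    simp only [Bool.not_true, Bool.false_eq_true, reduceIte]
    rw [pvInit_eq]
    exact pvLoop_eq nm messages _
      (fun s v h => (PySem.List.mem_dedup _ _).mpr (pvGet?_mk_mem nm s v h)) (fun _ => "")
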